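-- pv_equiv track=rewrite | github.com/stanislavstoyanov99/Smith-Waterman-Parallel--CourseWork | Smith-Waterman-Parallel.py | alignment_string
-- ===== SOURCE A (Python) =====
-- def alignment_string(aligned_seq1, aligned_seq2):
--
--     idents, gaps, mismatches = 0, 0, 0
--     alignment_string = []
--
--     for base1, base2 in zip(aligned_seq1, aligned_seq2):
--         if base1 == base2:
--             alignment_string.append('| ')
--             idents += 1
--         elif '-' in (base1, base2):
--             alignment_string.append(' ')
--             gaps += 1
--         else:
--             alignment_string.append(': ')
--             mismatches += 1
--
--     return ''.join(alignment_string), idents, gaps, mismatches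
-- ===== SOURCE B (Python) =====
-- def alignment_string(aligned_seq1, aligned_seq2):
--     n = min(len(aligned_seq1), len(aligned_seq2))
--     ann = ''.join('| ' if b1 == b2 else (' ' if '-' in (b1, b2) else ': ')
--                   for b1, b2 in zip(aligned_seq1, aligned_seq2))
--     idents = ann.count('|')
--     mismatches = ann.count(':')
--     return ann, idents, n - idents - mismatches, mismatches
-- ===== Notes on version B (the rewrite author's own statement) =====
-- stated objective: alternative
-- what changed: B first builds the annotation string alone, then derives the statistics from that string itself: idents = ann.count('|'), mismatches = ann.count(':'), and gaps by closed-form subtraction from the zipped length, so no counters are maintained during the pair scan at all.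
import Mathlib
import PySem

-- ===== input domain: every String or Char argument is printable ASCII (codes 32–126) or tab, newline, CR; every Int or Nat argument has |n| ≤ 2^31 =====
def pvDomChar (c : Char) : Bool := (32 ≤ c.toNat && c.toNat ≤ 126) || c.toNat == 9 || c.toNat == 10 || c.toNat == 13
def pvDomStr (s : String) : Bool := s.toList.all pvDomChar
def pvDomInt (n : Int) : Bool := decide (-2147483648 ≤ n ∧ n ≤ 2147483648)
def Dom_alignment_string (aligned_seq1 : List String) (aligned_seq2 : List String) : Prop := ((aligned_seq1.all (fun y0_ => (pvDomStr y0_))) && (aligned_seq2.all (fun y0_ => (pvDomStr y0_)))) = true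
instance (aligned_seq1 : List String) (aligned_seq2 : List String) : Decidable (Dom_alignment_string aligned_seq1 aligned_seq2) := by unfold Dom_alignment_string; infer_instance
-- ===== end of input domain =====

-- B builds the annotation string alone first, then derives idents and mismatches by counting
-- the marker characters '|' and ':' inside that string, and gaps by subtraction; objective: alternative decomposition.

-- ===== PORT A =====
-- one loop step of A: appends the annotation piece and bumps the matching counter
def pvStepA (st : List String × Int × Int × Int) (p : String × String) : List String × Int × Int × Int :=
  let (acc, idents, gaps, mismatches) := st
  if p.1 == p.2 then (acc ++ ["| "], idents + 1, gaps, mismatches)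
  else if p.1 == "-" || p.2 == "-" then (acc ++ [" "], idents, gaps + 1, mismatches)
  else (acc ++ [": "], idents, gaps, mismatches + 1)

def alignment_string (aligned_seq1 : List String) (aligned_seq2 : List String) : String × Int × Int × Int :=
  let st := (aligned_seq1.zip aligned_seq2).foldl pvStepA ([], 0, 0, 0)
  (String.join st.1, st.2.1, st.2.2.1, st.2.2.2)

-- ===== PORT B =====
def pvSym (p : String × String) : String :=
  if p.1 == p.2 then "| " else if p.1 == "-" || p.2 == "-" then " " else ": "

def alignment_string_alt (aligned_seq1 : List String) (aligned_seq2 : List String) : String × Int × Int × Int :=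
  let n : Int := min (aligned_seq1.length : Int) (aligned_seq2.length : Int)
  let ann := String.join ((aligned_seq1.zip aligned_seq2).map pvSym)
  let idents : Int := PySem.Str.count ann "|"
  let mismatches : Int := PySem.Str.count ann ":"
  (ann, idents, n - idents - mismatches, mismatches)

-- ===== PRECONDITION & SPEC =====
def Spec_alignment_string (aligned_seq1 : List String) (aligned_seq2 : List String) (out : String × Int × Int × Int) : Prop := out = alignment_string_alt aligned_seq1 aligned_seq2
instance (aligned_seq1 : List String) (aligned_seq2 : List String) (out : String × Int × Int × Int) : Decidable (Spec_alignment_string aligned_seq1 aligned_seq2 out) := by unfold Spec_alignment_string; infer_instance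

-- ===== CLAIM (what is proved, stated in full; the proofs are below) =====
def Claim_equal_alignment_string : Prop := ∀ (aligned_seq1 : List String) (aligned_seq2 : List String), Dom_alignment_string aligned_seq1 aligned_seq2 → Spec_alignment_string aligned_seq1 aligned_seq2 (alignment_string aligned_seq1 aligned_seq2)

-- ===== LEMMAS AND PROOFS =====
-- A's fold in closed form: annotation pieces plus the three partition counts
lemma foldA_eq (l : List (String × String)) (acc : List String) (i g m : Int) :
    l.foldl pvStepA (acc, i, g, m) =
      (acc ++ l.map pvSym,
       i + (l.countP (fun p => p.1 == p.2) : Int),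
       g + (l.countP (fun p => p.1 != p.2 && (p.1 == "-" || p.2 == "-")) : Int),
       m + (l.countP (fun p => p.1 != p.2 && (!(p.1 == "-") && !(p.2 == "-"))) : Int)) := by
  induction l generalizing acc i g m with
  | nil => simp
  | cons hd tl ih =>
    simp only [List.foldl_cons, pvStepA]
    by_cases h1 : hd.1 = hd.2
    · simp [h1, ih, pvSym]; omega
    · have e1 : (hd.1 == hd.2) = false := by simp [h1]
      by_cases h2 : hd.1 = "-" ∨ hd.2 = "-"
      · have e2 : (hd.1 == "-" || hd.2 == "-") = true := by
          rcases h2 with h | h <;> simp [h]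
        simp [pvSym, e1, e2, ih, List.countP_cons, bne]
        exact ⟨by omega, fun h => h2.resolve_left h⟩
      · rw [not_or] at h2
        have e2 : (hd.1 == "-" || hd.2 == "-") = false := by simp [h2.1, h2.2]
        simp [pvSym, e1, e2, ih, List.countP_cons, bne]
        rw [if_pos h2]; omega

-- Python s.count(c) for a single-character needle = List.count of that character
lemma countGo_single (c : Char) (l : List Char) (fuel acc : Nat) (h : l.length ≤ fuel) :
    PySem.Chars.count.go [c] fuel l acc = acc + l.count c := by
  induction l generalizing fuel acc with
  | nil => cases fuel <;> simp [PySem.Chars.count.go]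
  | cons hd tl ih =>
    cases fuel with
    | zero => simp at h
    | succ f =>
      rw [PySem.Chars.count.go]
      by_cases hc : c = hd
      · subst hc
        rw [if_pos (by simp [List.isPrefixOf])]
        simp only [List.length_singleton, List.drop_succ_cons, List.drop_zero]
        rw [ih f (acc + 1) (by simpa using h)]
        simp; omega
      · have hb : (c == hd) = false := by simp [hc]
        rw [if_neg (by simp [List.isPrefixOf, hb])]
        rw [ih f acc (by simpa using h)]
        simp [Ne.symm hc]

lemma count_single (s : List Char) (c : Char) :
    PySem.Chars.count s [c] = s.count c := by
  simp [PySem.Chars.count, countGo_single c s s.length 0 (le_refl _)]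

-- each annotation symbol carries '|' exactly when the pair matched …
lemma count_bar_sym (p : String × String) :
    (pvSym p).toList.count '|' = (if (p.1 == p.2) = true then 1 else 0) := by
  unfold pvSym; split_ifs <;> simp_all

-- … and ':' exactly when it was a mismatch
lemma count_colon_sym (p : String × String) :
    (pvSym p).toList.count ':' = (if (p.1 != p.2 && (!(p.1 == "-") && !(p.2 == "-"))) = true then 1 else 0) := by
  unfold pvSym
  by_cases h1 : p.1 = p.2
  · simp [h1]
  · by_cases h2 : p.1 = "-" ∨ p.2 = "-"
    · rcases h2 with h | h <;> simp [h1, h] <;> split_ifs <;> simp_all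
    · rw [not_or] at h2
      simp [h1, h2.1, h2.2]

lemma toList_join_map (l : List (String × String)) :
    (String.join (l.map pvSym)).toList = (l.map (fun p => (pvSym p).toList)).flatten := by
  simp [String.toList_join, List.map_map]
  rfl

lemma count_bar (l : List (String × String)) :
    ((String.join (l.map pvSym)).toList).count '|' = l.countP (fun p => p.1 == p.2) := by
  rw [toList_join_map]
  induction l with
  | nil => simp
  | cons hd tl ih =>
    simp only [List.map_cons, List.flatten_cons, List.count_append, List.countP_cons, ih,
      count_bar_sym]
    omega
  -- (omega sees both if-terms as the same atom)

lemma count_colon (l : List (String × String)) :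
    ((String.join (l.map pvSym)).toList).count ':'
      = l.countP (fun p => p.1 != p.2 && (!(p.1 == "-") && !(p.2 == "-"))) := by
  rw [toList_join_map]
  induction l with
  | nil => simp
  | cons hd tl ih =>
    simp only [List.map_cons, List.flatten_cons, List.count_append, List.countP_cons, ih,
      count_colon_sym]
    omega

-- the three branch predicates partition every pair
lemma partition_count (l : List (String × String)) :
    l.countP (fun p => p.1 == p.2)
      + l.countP (fun p => p.1 != p.2 && (p.1 == "-" || p.2 == "-"))
      + l.countP (fun p => p.1 != p.2 && (!(p.1 == "-") && !(p.2 == "-"))) = l.length := by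
  induction l with
  | nil => rfl
  | cons hd tl ih =>
    simp only [List.countP_cons, List.length_cons]
    have step : ∀ b1 b2 b3 : Bool,
        ((b1 = true ∨ b2 = true ∨ b3 = true) ∧ (b1 → ¬ b2) ∧ (b1 → ¬ b3) ∧ (b2 → ¬ b3)) →
        tl.countP (fun p => p.1 == p.2) + (if b1 = true then 1 else 0)
          + (tl.countP (fun p => p.1 != p.2 && (p.1 == "-" || p.2 == "-")) + (if b2 = true then 1 else 0))
          + (tl.countP (fun p => p.1 != p.2 && (!(p.1 == "-") && !(p.2 == "-"))) + (if b3 = true then 1 else 0))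
          = tl.length + 1 := by
      rintro b1 b2 b3 ⟨hor, _, _, _⟩
      rcases b1 <;> rcases b2 <;> rcases b3 <;> simp_all <;> omega
    apply step
    by_cases h1 : hd.1 = hd.2
    · simp [h1]
    · by_cases h2 : hd.1 = "-" ∨ hd.2 = "-"
      · rcases h2 with h | h <;> simp [h1, h] <;> exact em _
      · rw [not_or] at h2; simp [h1, h2.1, h2.2]

-- ===== VERDICT (by name: the statement is the Claim_ definition above) =====
theorem alignment_string_spec : Claim_equal_alignment_string := by
  intro s1 s2 _
  unfold Spec_alignment_string alignment_string alignment_string_alt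
  simp only [foldA_eq, List.nil_append]
  have hlen := partition_count (s1.zip s2)
  have hb : PySem.Str.count (String.join ((s1.zip s2).map pvSym)) "|"
      = (s1.zip s2).countP (fun p => p.1 == p.2) := by
    show PySem.Chars.count _ _ = _
    rw [show ("|" : String).toList = ['|'] from rfl, count_single, count_bar]
  have hc : PySem.Str.count (String.join ((s1.zip s2).map pvSym)) ":"
      = (s1.zip s2).countP (fun p => p.1 != p.2 && (!(p.1 == "-") && !(p.2 == "-"))) := by
    show PySem.Chars.count _ _ = _
    rw [show (":" : String).toList = [':'] from rfl, count_single, count_colon]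
  have hz : (s1.zip s2).length = min s1.length s2.length := List.length_zip
  refine Prod.ext rfl (Prod.ext ?_ (Prod.ext ?_ ?_)) <;>
    simp only [hb, hc] <;> push_cast <;> omega
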